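-- pv_equiv track=rewrite | github.com/maximbarbe/Kattis | welcomeeasy.py | find_total_number
-- ===== SOURCE A (Python) =====
-- def find_total_number(idx, string_idx, string, word):
--     if idx == len(word):
--         return 1
--     if string_idx == len(string):
--         return 0
--     if word[idx] != string[string_idx]:
--         return find_total_number(idx, string_idx + 1, string, word) % 10000
--     else:
--         return (find_total_number(idx + 1, string_idx + 1, string, word) + find_total_number(idx, string_idx + 1, string, word)) % 10000
-- ===== SOURCE B (Python) =====
-- def find_total_number(idx, string_idx, string, word):
--     L = len(word)
--     n = L - idx  # number of word positions still to match
--     # cur[k] = number of ways (mod 10000) to match word positions idx+k..L-1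
--     # in the part of the string not yet processed; column for j = len(string).
--     cur = [1 if k == n else 0 for k in range(n + 1)]
--     for j in reversed(range(string_idx, len(string))):
--         c = string[j]
--         cur = [1 if k == n else
--                ((cur[k] + cur[k + 1]) % 10000 if word[idx + k] == c else cur[k])
--                for k in range(n + 1)]
--     return cur[0]
-- ===== Notes on version B (the rewrite author's own statement) =====
-- stated objective: alternative
-- what changed: Replaces A's exponential branching recursion by a bottom-up dynamic program that sweeps the string right-to-left keeping one column cur[k] = number of ways (mod 10000) to match word[idx+k:] in the unprocessed part of the string.
-- outside the precondition, e.g. on find_total_number(5, 1, 'a', 'ab'): A returns 0, B raises IndexError; on find_total_number(2, -9, 'a', 'ab'): A returns 1, B raises IndexError; on find_total_number(-7, 1, 'a', 'ab'): A returns 0, B returns 0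
import Mathlib
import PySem

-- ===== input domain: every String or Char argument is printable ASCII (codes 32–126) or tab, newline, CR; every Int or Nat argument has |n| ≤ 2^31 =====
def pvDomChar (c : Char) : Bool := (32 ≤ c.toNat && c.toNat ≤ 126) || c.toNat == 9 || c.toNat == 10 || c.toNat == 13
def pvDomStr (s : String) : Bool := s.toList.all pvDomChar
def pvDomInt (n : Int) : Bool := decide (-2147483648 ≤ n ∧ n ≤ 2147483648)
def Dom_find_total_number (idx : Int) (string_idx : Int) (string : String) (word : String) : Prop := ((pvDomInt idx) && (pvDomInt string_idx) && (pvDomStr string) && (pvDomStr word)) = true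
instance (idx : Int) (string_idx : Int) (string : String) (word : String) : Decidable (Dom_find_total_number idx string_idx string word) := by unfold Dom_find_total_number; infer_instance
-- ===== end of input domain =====

-- B replaces A's branching recursion by a bottom-up one-column dynamic program over the
-- recursion's (word-position, string-position) state space (objective: alternative).

-- helper needed by port A's termination proof (cited in decreasing_by)
theorem pv_lt_len_of_pyGet?_some {s : String} {i : Int} {c : Char}
    (h : PySem.Str.pyGet? s i = some c) : i < PySem.Str.len s := by
  by_contra hge
  have hnone : PySem.Str.pyGet? s i = none := by
    simp only [PySem.Str.pyGet?, PySem.Chars.pyGet?]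
    rw [PySem.List.pyGet?_eq_none_iff]
    simp only [PySem.Raise.InRange]
    rw [PySem.Str.len_eq] at hge
    omega
  rw [h] at hnone
  simp at hnone

-- ===== PORT A =====
def find_total_number (idx : Int) (string_idx : Int) (string : String) (word : String) : Int :=
  if idx = PySem.Str.len word then 1
  else if string_idx = PySem.Str.len string then 0
  else
    match _h1 : PySem.Str.pyGet? word idx, _h2 : PySem.Str.pyGet? string string_idx with
    | some wc, some sc =>
        if wc ≠ sc then
          PySem.Int.mod (find_total_number idx (string_idx + 1) string word) 10000
        else
          PySem.Int.mod
            (find_total_number (idx + 1) (string_idx + 1) string word +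
             find_total_number idx (string_idx + 1) string word) 10000
    | _, _ => 0  -- Python raises IndexError here; excluded by Pre_
termination_by (PySem.Str.len string - string_idx).toNat
decreasing_by
  · have := pv_lt_len_of_pyGet?_some _h2; omega
  · have := pv_lt_len_of_pyGet?_some _h2; omega
  · have := pv_lt_len_of_pyGet?_some _h2; omega

-- ===== PORT B =====
def find_total_number_alt (idx : Int) (string_idx : Int) (string : String) (word : String) : Int :=
  let n := PySem.Str.len word - idx
  let cur0 := (PySem.List.pyRange 0 (n + 1) 1).map (fun k => if k = n then (1 : Int) else 0)
  let cur := ((PySem.List.pyRange string_idx (PySem.Str.len string) 1).reverse).foldl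
    (fun cur j =>
      let c := (PySem.Str.pyGet? string j).getD ' '   -- some on Pre_; IndexError outside
      (PySem.List.pyRange 0 (n + 1) 1).map (fun k =>
        if k = n then (1 : Int)
        else if (PySem.Str.pyGet? word (idx + k)).getD ' ' = c then
          PySem.Int.mod (PySem.List.pyGetD cur k 0 + PySem.List.pyGetD cur (k + 1) 0) 10000
        else PySem.List.pyGetD cur k 0))
    cur0
  PySem.List.pyGetD cur 0 0

-- ===== PRECONDITION & SPEC =====
-- Pre_ admits exactly the in-range index pairs (Python's negative in-range indices included)
-- plus the idx = len(word) ray above len(string); outside it A raises IndexError on the first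
-- out-of-range access — except on the corners where one of A's two length-equality checks
-- fires before the out-of-range access (A returns 0 or 1 there) while B's table
-- construction/indexing raises or the table size is infeasible: those corners are excluded.
def Pre_find_total_number (idx : Int) (string_idx : Int) (string : String) (word : String) : Prop :=
  (-(PySem.Str.len word) ≤ idx ∧ idx ≤ PySem.Str.len word ∧
   -(PySem.Str.len string) ≤ string_idx ∧ string_idx ≤ PySem.Str.len string)
  ∨ (idx = PySem.Str.len word ∧ PySem.Str.len string < string_idx)
instance (idx : Int) (string_idx : Int) (string : String) (word : String) : Decidable (Pre_find_total_number idx string_idx string word) := by unfold Pre_find_total_number; infer_instance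

def pvWitness_find_total_number : Int × Int × String × String := (0, 0, "abab", "ab")

def Spec_find_total_number (idx : Int) (string_idx : Int) (string : String) (word : String) (out : Int) : Prop := out = find_total_number_alt idx string_idx string word
instance (idx : Int) (string_idx : Int) (string : String) (word : String) (out : Int) : Decidable (Spec_find_total_number idx string_idx string word out) := by unfold Spec_find_total_number; infer_instance

-- ===== CLAIM (what is proved, stated in full; the proofs are below) =====
def Claim_equal_find_total_number : Prop := ∀ (idx : Int) (string_idx : Int) (string : String) (word : String), Dom_find_total_number idx string_idx string word → Pre_find_total_number idx string_idx string word → Spec_find_total_number idx string_idx string word (find_total_number idx string_idx string word)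

-- ===== LEMMAS AND PROOFS =====

-- every branch of A returns a value in [0, 10000)
theorem pv_T_bounds (idx string_idx : Int) (string word : String) :
    0 ≤ find_total_number idx string_idx string word ∧
    find_total_number idx string_idx string word < 10000 := by
  rw [find_total_number.eq_def]
  split
  · norm_num
  · split
    · norm_num
    · split
      · split
        · exact ⟨PySem.Int.mod_nonneg _ (by norm_num), PySem.Int.mod_lt _ (by norm_num)⟩
        · exact ⟨PySem.Int.mod_nonneg _ (by norm_num), PySem.Int.mod_lt _ (by norm_num)⟩
      · norm_num

theorem pv_mod_id {a : Int} (h0 : 0 ≤ a) (h1 : a < 10000) : PySem.Int.mod a 10000 = a := by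
  rw [PySem.Int.mod_eq_emod_of_pos (by norm_num)]
  exact Int.emod_eq_of_lt h0 h1

theorem pv_strGet_some (s : String) (i : Int)
    (h1 : -(PySem.Str.len s) ≤ i) (h2 : i < PySem.Str.len s) :
    ∃ c, PySem.Str.pyGet? s i = some c := by
  rcases h : PySem.Str.pyGet? s i with _ | c
  · exfalso
    simp only [PySem.Str.pyGet?, PySem.Chars.pyGet?] at h
    rw [PySem.List.pyGet?_eq_none_iff] at h
    simp only [PySem.Raise.InRange] at h
    rw [PySem.Str.len_eq] at h1 h2
    omega
  · exact ⟨c, rfl⟩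

theorem pv_T_base1 (idx string_idx : Int) (string word : String)
    (h : idx = PySem.Str.len word) :
    find_total_number idx string_idx string word = 1 := by
  rw [find_total_number.eq_def, if_pos h]

theorem pv_T_baseS (idx string_idx : Int) (string word : String)
    (h : idx ≠ PySem.Str.len word) (h2 : string_idx = PySem.Str.len string) :
    find_total_number idx string_idx string word = 0 := by
  rw [find_total_number.eq_def, if_neg h, if_pos h2]

theorem pv_T_step (idx string_idx : Int) (string word : String) {wc sc : Char}
    (h : idx ≠ PySem.Str.len word) (h2 : string_idx ≠ PySem.Str.len string)
    (hw : PySem.Str.pyGet? word idx = some wc)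
    (hs : PySem.Str.pyGet? string string_idx = some sc) :
    find_total_number idx string_idx string word =
      if wc = sc then
        PySem.Int.mod
          (find_total_number (idx + 1) (string_idx + 1) string word +
           find_total_number idx (string_idx + 1) string word) 10000
      else PySem.Int.mod (find_total_number idx (string_idx + 1) string word) 10000 := by
  rw [find_total_number.eq_def, if_neg h, if_neg h2]
  rw [hw, hs]
  simp only [ne_eq, ite_not]

-- the DP invariant: after folding columns j, …, len(string)-1, the table is the column of
-- A's values at string position j
theorem pv_col (idx string_idx : Int) (string word : String)
    (hwl : -(PySem.Str.len word) ≤ idx) (_hwu : idx ≤ PySem.Str.len word)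
    (hsl : -(PySem.Str.len string) ≤ string_idx) :
    ∀ (m : Nat) (j : Int), string_idx ≤ j → j ≤ PySem.Str.len string →
      (PySem.Str.len string - j).toNat = m →
      ((PySem.List.pyRange j (PySem.Str.len string) 1).reverse).foldl
        (fun cur j =>
          let c := (PySem.Str.pyGet? string j).getD ' '
          (PySem.List.pyRange 0 (PySem.Str.len word - idx + 1) 1).map (fun k =>
            if k = PySem.Str.len word - idx then (1 : Int)
            else if (PySem.Str.pyGet? word (idx + k)).getD ' ' = c then
              PySem.Int.mod (PySem.List.pyGetD cur k 0 + PySem.List.pyGetD cur (k + 1) 0) 10000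
            else PySem.List.pyGetD cur k 0))
        ((PySem.List.pyRange 0 (PySem.Str.len word - idx + 1) 1).map
          (fun k => if k = PySem.Str.len word - idx then (1 : Int) else 0))
      = (PySem.List.pyRange 0 (PySem.Str.len word - idx + 1) 1).map
          (fun k => find_total_number (idx + k) j string word) := by
  intro m
  induction m with
  | zero =>
    intro j hj1 hj2 hm
    have hjS : j = PySem.Str.len string := by omega
    rw [hjS, PySem.List.pyRange_one_eq_nil (le_refl _)]
    simp only [List.reverse_nil, List.foldl_nil]
    apply List.map_congr_left
    intro k hk
    rw [PySem.List.mem_pyRange_one] at hk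
    by_cases hkn : k = PySem.Str.len word - idx
    · rw [if_pos hkn, pv_T_base1 _ _ _ _ (by omega)]
    · rw [if_neg hkn, pv_T_baseS _ _ _ _ (by omega) rfl]
  | succ m ih =>
    intro j hj1 hj2 hm
    have hjS : j < PySem.Str.len string := by omega
    rw [PySem.List.pyRange_one_cons hjS, List.reverse_cons, List.foldl_append,
        ih (j + 1) (by omega) (by omega) (by omega)]
    simp only [List.foldl_cons, List.foldl_nil]
    obtain ⟨sc, hsc⟩ := pv_strGet_some string j (by omega) hjS
    rw [hsc]
    apply List.map_congr_left
    intro k hk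
    rw [PySem.List.mem_pyRange_one] at hk
    by_cases hkn : k = PySem.Str.len word - idx
    · rw [if_pos hkn, pv_T_base1 _ _ _ _ (by omega)]
    · rw [if_neg hkn]
      obtain ⟨wc, hwc⟩ := pv_strGet_some word (idx + k) (by omega) (by omega)
      rw [hwc]
      rw [PySem.List.pyGetD_map_pyRange_of_nonneg _ _ _ _ (by omega) (by omega),
          PySem.List.pyGetD_map_pyRange_of_nonneg _ _ _ _ (by omega) (by omega)]
      rw [pv_T_step (idx + k) j string word (by omega) (by omega) hwc hsc]
      simp only [Option.getD_some]
      by_cases hcs : wc = sc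
      · rw [if_pos hcs, if_pos hcs]
        have : idx + (k + 1) = idx + k + 1 := by ring
        rw [this, Int.add_comm (find_total_number (idx + k) (j + 1) string word)]
      · rw [if_neg hcs, if_neg hcs]
        obtain ⟨hb0, hb1⟩ := pv_T_bounds (idx + k) (j + 1) string word
        rw [pv_mod_id hb0 hb1]

-- ===== VERDICT (by name: the statement is the Claim_ definition above) =====
theorem find_total_number_spec : Claim_equal_find_total_number := by
  intro idx string_idx string word _hdom hpre
  unfold Spec_find_total_number find_total_number_alt
  dsimp only
  rcases hpre with ⟨hwl, hwu, hsl, hsu⟩ | ⟨hL, hS⟩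
  · rw [pv_col idx string_idx string word hwl hwu hsl
        (PySem.Str.len string - string_idx).toNat string_idx (le_refl _) hsu rfl]
    rw [PySem.List.pyGetD_map_pyRange_of_nonneg _ _ _ _ (by omega) (by omega)]
    rw [add_zero]
  · rw [PySem.List.pyRange_one_eq_nil (a := string_idx) (b := PySem.Str.len string) (by omega)]
    simp only [List.reverse_nil, List.foldl_nil]
    rw [PySem.List.pyGetD_map_pyRange_of_nonneg _ _ _ _ (by omega) (by omega)]
    rw [if_pos (by omega), pv_T_base1 _ _ _ _ hL]
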